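-- pv_equiv track=rewrite | github.com/windshock/waf-ips-ids-retest | scripts/render_soc_handoff.py | build_query_windows
-- ===== SOURCE A (Python) =====
-- from collections import defaultdict
--
-- def build_query_windows(rows: list[dict[str, str]]) -> str:
--     windows: dict[tuple[str, str], list[str]] = defaultdict(list)
--     for row in rows:
--         ts = row.get("timestamp", "")
--         proto = row.get("protocol", "") or "UNKNOWN"
--         date_key = ts[:10] if ts else "unknown-date"
--         windows[(date_key, proto)].append(ts)
--
--     lines = []
--     for (date_key, proto), timestamps in sorted(windows.items()):
--         timestamps = [ts for ts in timestamps if ts]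
--         start = min(timestamps) if timestamps else ""
--         end = max(timestamps) if timestamps else ""
--         lines.append(f"- {date_key} {proto}: {start} ~ {end} ({len(timestamps)} rows)")
--     return "\n".join(lines) if lines else "- No timestamps available"
-- ===== SOURCE B (Python) =====
-- def build_query_windows(rows: list[dict[str, str]]) -> str:
--     # One pass keeping per-group running (count, start, end) records instead of
--     # collecting timestamp lists and re-scanning each group afterwards.
--     recs: dict[tuple[str, str], tuple[int, str, str]] = {}
--     for row in rows:
--         ts = row.get("timestamp", "")
--         proto = row.get("protocol", "") or "UNKNOWN"
--         key = (ts[:10] if ts else "unknown-date", proto)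
--         c, s, e = recs.get(key, (0, "", ""))
--         if ts:
--             c, s, e = (1, ts, ts) if c == 0 else (c + 1, min(s, ts), max(e, ts))
--         recs[key] = (c, s, e)
--     lines = ["- {} {}: {} ~ {} ({} rows)".format(d, p, s, e, c)
--              for (d, p), (c, s, e) in sorted(recs.items())]
--     return "\n".join(lines) if lines else "- No timestamps available"
-- ===== Notes on version B (the rewrite author's own statement) =====
-- stated objective: alternative
-- what changed: Instead of grouping full timestamp lists per (date,protocol) key and re-scanning each group with filter/min/max/len afterwards, B keeps a single running (count, min, max) record per key updated in the same pass, registering a group on first sight but only folding non-empty timestamps into its record.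
import Mathlib
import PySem

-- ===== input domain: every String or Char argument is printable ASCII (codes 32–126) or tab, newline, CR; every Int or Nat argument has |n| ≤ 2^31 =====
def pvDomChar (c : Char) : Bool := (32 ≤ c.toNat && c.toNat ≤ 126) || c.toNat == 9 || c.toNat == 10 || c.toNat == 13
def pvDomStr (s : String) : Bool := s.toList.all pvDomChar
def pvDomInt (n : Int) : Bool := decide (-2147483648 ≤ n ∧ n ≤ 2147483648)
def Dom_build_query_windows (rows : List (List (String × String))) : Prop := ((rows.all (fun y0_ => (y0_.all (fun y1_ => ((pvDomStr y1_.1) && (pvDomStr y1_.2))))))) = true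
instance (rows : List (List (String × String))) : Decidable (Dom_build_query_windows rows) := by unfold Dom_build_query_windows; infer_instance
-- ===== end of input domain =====

-- B replaces A's per-group timestamp lists (re-scanned with filter/min/max/len after the
-- grouping pass) by a single running (count, min, max) record per group kept in one pass.

-- ===== PORT A =====
def build_query_windows (rows : List (List (String × String))) : String :=
  let windows := rows.foldl (fun w row =>
    let ts := (PySem.Dict.mk row).getD "timestamp" ""
    let p0 := (PySem.Dict.mk row).getD "protocol" ""
    let proto := if p0 ≠ "" then p0 else "UNKNOWN"        -- row.get("protocol","") or "UNKNOWN"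
    let date_key := if ts ≠ "" then PySem.Str.slice ts none (some 10) else "unknown-date"
    w.modify (date_key, proto) [] (fun l => l ++ [ts]))   -- defaultdict(list): windows[k].append(ts)
    PySem.Dict.empty
  let lines := (PySem.List.sorted2 windows.items (fun q => q.1.1) (fun q => q.1.2)).map (fun q =>
    let timestamps := q.2.filter (fun ts => ts ≠ "")
    let start := if timestamps ≠ [] then (PySem.List.min? timestamps (fun x => x)).getD "" else ""
    let stop  := if timestamps ≠ [] then (PySem.List.max? timestamps (fun x => x)).getD "" else ""
    PySem.Str.join "" ["- ", q.1.1, " ", q.1.2, ": ", start, " ~ ", stop, " (",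
      PySem.Int.toStr (timestamps.length : Int), " rows)"])
  if lines ≠ [] then PySem.Str.join "\n" lines else "- No timestamps available"

-- ===== PORT B =====
def build_query_windows_alt (rows : List (List (String × String))) : String :=
  let recs := rows.foldl (fun d row =>
    let ts := (PySem.Dict.mk row).getD "timestamp" ""
    let p0 := (PySem.Dict.mk row).getD "protocol" ""
    let proto := if p0 ≠ "" then p0 else "UNKNOWN"
    let key := (if ts ≠ "" then PySem.Str.slice ts none (some 10) else "unknown-date", proto)
    let r := d.getD key ((0 : Int), "", "")
    let r' := if ts ≠ "" then
        (if r.1 = 0 then ((1 : Int), ts, ts) else (r.1 + 1, min r.2.1 ts, max r.2.2 ts))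
      else r
    d.insert key r')
    PySem.Dict.empty
  let lines := (PySem.List.sorted2 recs.items (fun q => q.1.1) (fun q => q.1.2)).map (fun q =>
    PySem.Str.join "" ["- ", q.1.1, " ", q.1.2, ": ", q.2.2.1, " ~ ", q.2.2.2, " (",
      PySem.Int.toStr q.2.1, " rows)"])
  if lines ≠ [] then PySem.Str.join "\n" lines else "- No timestamps available"

-- ===== PRECONDITION & SPEC =====
def Spec_build_query_windows (rows : List (List (String × String))) (out : String) : Prop := out = build_query_windows_alt rows
instance (rows : List (List (String × String))) (out : String) : Decidable (Spec_build_query_windows rows out) := by unfold Spec_build_query_windows; infer_instance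

-- ===== CLAIM (what is proved, stated in full; the proofs are below) =====
def Claim_equal_build_query_windows : Prop := ∀ (rows : List (List (String × String))), Dom_build_query_windows rows → Spec_build_query_windows rows (build_query_windows rows)

-- ===== LEMMAS AND PROOFS =====

-- A-group summary: what A computes from a group's timestamp list = B's record for that group.
def pvSumm (l : List String) : Int × String × String :=
  let f := l.filter (fun ts => ts ≠ "")
  (((f.length : Int)),
    (if f ≠ [] then (PySem.List.min? f (fun x => x)).getD "" else ""),
    (if f ≠ [] then (PySem.List.max? f (fun x => x)).getD "" else ""))

def pvG (q : (String × String) × List String) : (String × String) × (Int × String × String) :=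
  (q.1, pvSumm q.2)

def pvTs (row : List (String × String)) : String := (PySem.Dict.mk row).getD "timestamp" ""

def pvKeyOf (row : List (String × String)) : String × String :=
  ((if pvTs row ≠ "" then PySem.Str.slice (pvTs row) none (some 10) else "unknown-date"),
   (if (PySem.Dict.mk row).getD "protocol" "" ≠ "" then (PySem.Dict.mk row).getD "protocol" "" else "UNKNOWN"))

def pvStepA (w : PySem.Dict (String × String) (List String)) (row : List (String × String)) :
    PySem.Dict (String × String) (List String) :=
  w.modify (pvKeyOf row) [] (fun l => l ++ [pvTs row])

def pvStepB (d : PySem.Dict (String × String) (Int × String × String)) (row : List (String × String)) :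
    PySem.Dict (String × String) (Int × String × String) :=
  d.insert (pvKeyOf row)
    (if pvTs row ≠ "" then
        (if (d.getD (pvKeyOf row) ((0 : Int), "", "")).1 = 0 then ((1 : Int), pvTs row, pvTs row)
         else ((d.getD (pvKeyOf row) ((0 : Int), "", "")).1 + 1,
               min (d.getD (pvKeyOf row) ((0 : Int), "", "")).2.1 (pvTs row),
               max (d.getD (pvKeyOf row) ((0 : Int), "", "")).2.2 (pvTs row)))
      else d.getD (pvKeyOf row) ((0 : Int), "", ""))

def pvLineA (q : (String × String) × List String) : String :=
  let timestamps := q.2.filter (fun ts => ts ≠ "")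
  let start := if timestamps ≠ [] then (PySem.List.min? timestamps (fun x => x)).getD "" else ""
  let stop  := if timestamps ≠ [] then (PySem.List.max? timestamps (fun x => x)).getD "" else ""
  PySem.Str.join "" ["- ", q.1.1, " ", q.1.2, ": ", start, " ~ ", stop, " (",
    PySem.Int.toStr (timestamps.length : Int), " rows)"]

def pvLineB (q : (String × String) × (Int × String × String)) : String :=
  PySem.Str.join "" ["- ", q.1.1, " ", q.1.2, ": ", q.2.2.1, " ~ ", q.2.2.2, " (",
    PySem.Int.toStr q.2.1, " rows)"]

def pvRenderA (items : List ((String × String) × List String)) : String :=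
  let lines := (PySem.List.sorted2 items (fun q => q.1.1) (fun q => q.1.2)).map pvLineA
  if lines ≠ [] then PySem.Str.join "\n" lines else "- No timestamps available"

def pvRenderB (items : List ((String × String) × (Int × String × String))) : String :=
  let lines := (PySem.List.sorted2 items (fun q => q.1.1) (fun q => q.1.2)).map pvLineB
  if lines ≠ [] then PySem.Str.join "\n" lines else "- No timestamps available"

lemma pvPortA_unfold (rows : List (List (String × String))) :
    build_query_windows rows = pvRenderA (rows.foldl pvStepA PySem.Dict.empty).items := rfl

lemma pvPortB_unfold (rows : List (List (String × String))) :
    build_query_windows_alt rows = pvRenderB (rows.foldl pvStepB PySem.Dict.empty).items := rfl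

lemma pvFind (l : List ((String × String) × List String)) (k : String × String) :
    List.find? (fun p => p.1 == k) (l.map pvG) = (List.find? (fun p => p.1 == k) l).map pvG := by
  rw [List.find?_map]; rfl

lemma pvGet? (dA : PySem.Dict (String × String) (List String))
    (dB : PySem.Dict (String × String) (Int × String × String))
    (h : dB.items = dA.items.map pvG) (k : String × String) :
    dB.get? k = (dA.get? k).map pvSumm := by
  simp only [PySem.Dict.get?] at *
  rw [h, pvFind]
  cases List.find? (fun p => p.1 == k) dA.1 <;> rfl

lemma pvGetD (dA : PySem.Dict (String × String) (List String))
    (dB : PySem.Dict (String × String) (Int × String × String))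
    (h : dB.items = dA.items.map pvG) (k : String × String) :
    dB.getD k ((0 : Int), "", "") = pvSumm (dA.getD k []) := by
  simp only [PySem.Dict.getD, pvGet? dA dB h k]
  cases dA.get? k <;> rfl

lemma pvContains (dA : PySem.Dict (String × String) (List String))
    (dB : PySem.Dict (String × String) (Int × String × String))
    (h : dB.items = dA.items.map pvG) (k : String × String) :
    dB.contains k = dA.contains k := by
  simp only [PySem.Dict.contains] at *
  rw [h, List.any_map]; rfl

lemma pvInsert (dA : PySem.Dict (String × String) (List String))
    (dB : PySem.Dict (String × String) (Int × String × String))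
    (h : dB.items = dA.items.map pvG) (k : String × String) (w : List String) :
    (dB.insert k (pvSumm w)).items = ((dA.insert k w).items).map pvG := by
  have hc := pvContains dA dB h k
  unfold PySem.Dict.insert
  rw [hc]
  by_cases hck : dA.contains k = true
  · rw [if_pos hck, if_pos hck]
    show List.map (fun p => if (p.1 == k) = true then (k, pvSumm w) else p) dB.items
        = List.map pvG (List.map (fun p => if (p.1 == k) = true then (k, w) else p) dA.items)
    rw [h, List.map_map, List.map_map]
    apply List.map_congr_left
    intro p _
    by_cases hp : (p.1 == k) = true <;> simp [pvG, hp, Function.comp]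
  · rw [if_neg hck, if_neg hck]
    show dB.items ++ [(k, pvSumm w)] = List.map pvG (dA.items ++ [(k, w)])
    rw [h, List.map_append]
    rfl

lemma pvSumm_append (l : List String) (ts : String) :
    pvSumm (l ++ [ts]) =
      (if ts ≠ "" then
        (if (pvSumm l).1 = 0 then ((1 : Int), ts, ts)
         else ((pvSumm l).1 + 1, min (pvSumm l).2.1 ts, max (pvSumm l).2.2 ts))
       else pvSumm l) := by
  by_cases hts : ts = ""
  · subst hts
    simp [pvSumm, List.filter_append]
  · have hfil : List.filter (fun t => decide (t ≠ "")) [ts] = [ts] := by simp [hts]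
    simp only [pvSumm, List.filter_append, hfil, ne_eq, hts, not_false_eq_true, if_true]
    cases hf : List.filter (fun t => decide (t ≠ "")) l with
    | nil =>
      simp [PySem.List.min?, PySem.List.max?]
    | cons x t =>
      have hmin : PySem.List.min? ((x :: t) ++ [ts]) (fun y => y)
          = some (min (List.foldl min x t) ts) := by
        rw [show (x :: t) ++ [ts] = x :: (t ++ [ts]) from rfl, PySem.List.min?_id_cons]
        simp [List.foldl_append]
      have hmax : PySem.List.max? ((x :: t) ++ [ts]) (fun y => y)
          = some (max (List.foldl max x t) ts) := by
        rw [show (x :: t) ++ [ts] = x :: (t ++ [ts]) from rfl, PySem.List.max?_id_cons]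
        simp [List.foldl_append]
      have hne : ((t.length : Int) + 1) ≠ 0 := by omega
      simp [hne, PySem.List.min?_id_cons, PySem.List.max?_id_cons, List.foldl_append]

lemma pvStep_items (dA : PySem.Dict (String × String) (List String))
    (dB : PySem.Dict (String × String) (Int × String × String))
    (row : List (String × String)) (h : dB.items = dA.items.map pvG) :
    (pvStepB dB row).items = (pvStepA dA row).items.map pvG := by
  unfold pvStepA pvStepB PySem.Dict.modify
  rw [pvGetD dA dB h (pvKeyOf row), ← pvSumm_append (dA.getD (pvKeyOf row) []) (pvTs row)]
  exact pvInsert dA dB h (pvKeyOf row) (dA.getD (pvKeyOf row) [] ++ [pvTs row])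

lemma pvInv (rows : List (List (String × String)))
    (dA : PySem.Dict (String × String) (List String))
    (dB : PySem.Dict (String × String) (Int × String × String))
    (h : dB.items = dA.items.map pvG) :
    (rows.foldl pvStepB dB).items = ((rows.foldl pvStepA dA).items).map pvG := by
  induction rows generalizing dA dB with
  | nil => simpa using h
  | cons r t ih =>
    simp only [List.foldl_cons]
    exact ih _ _ (pvStep_items dA dB r h)

lemma pvInsertBy_map {α β : Type} (g : α → β) (ba : α → α → Bool) (bb : β → β → Bool)
    (h : ∀ a b, bb (g a) (g b) = ba a b) (x : α) :
    ∀ ys : List α, PySem.List.insertBy bb (g x) (ys.map g) = (PySem.List.insertBy ba x ys).map g := by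
  intro ys
  induction ys with
  | nil => rfl
  | cons y t ih =>
    simp only [List.map_cons, PySem.List.insertBy, h]
    by_cases hxy : ba x y = true <;> simp [hxy, ih]

lemma pvFoldl_insertBy_map {α β : Type} (g : α → β) (ba : α → α → Bool) (bb : β → β → Bool)
    (h : ∀ a b, bb (g a) (g b) = ba a b) :
    ∀ (xs : List α) (acc : List α),
      List.foldl (fun acc x => PySem.List.insertBy bb x acc) (acc.map g) (xs.map g)
        = (List.foldl (fun acc x => PySem.List.insertBy ba x acc) acc xs).map g := by
  intro xs
  induction xs with
  | nil => intro acc; rfl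
  | cons x t ih =>
    intro acc
    simp only [List.map_cons, List.foldl_cons]
    rw [pvInsertBy_map g ba bb h x acc]
    exact ih _

lemma pvSorted2_map (l : List ((String × String) × List String)) :
    PySem.List.sorted2 (l.map pvG) (fun q => q.1.1) (fun q => q.1.2)
      = (PySem.List.sorted2 l (fun q => q.1.1) (fun q => q.1.2)).map pvG := by
  show List.foldl (fun acc x => PySem.List.insertBy
        (fun a b => decide (a.1.1 < b.1.1) || (!decide (b.1.1 < a.1.1) && decide (a.1.2 < b.1.2))) x acc)
      (([] : List ((String × String) × List String)).map pvG) (l.map pvG)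
    = (List.foldl (fun acc x => PySem.List.insertBy
        (fun a b => decide (a.1.1 < b.1.1) || (!decide (b.1.1 < a.1.1) && decide (a.1.2 < b.1.2))) x acc)
      [] l).map pvG
  exact pvFoldl_insertBy_map pvG _ _ (fun a b => rfl) l []

lemma pvRender_eq (l : List ((String × String) × List String)) :
    pvRenderB (l.map pvG) = pvRenderA l := by
  unfold pvRenderA pvRenderB
  rw [pvSorted2_map l, List.map_map]
  rfl

-- ===== VERDICT (by name: the statement is the Claim_ definition above) =====
theorem build_query_windows_spec : Claim_equal_build_query_windows := by
  intro rows _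
  show build_query_windows rows = build_query_windows_alt rows
  rw [pvPortA_unfold, pvPortB_unfold,
    pvInv rows PySem.Dict.empty PySem.Dict.empty rfl, pvRender_eq]
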